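-- pv_equiv track=rewrite | github.com/wjmallard/isi-digital-backend | scripts/libisidebug.py | uncat_adc
-- ===== SOURCE A (Python) =====
-- import itertools
--
-- def uncat_adc (adc0_msb, adc0_lsb, adc1_msb, adc1_lsb):
-- 	"""Un-concatenates and re-interleaves adc data."""
-- 	iter0 = itertools.chain(adc0_msb)
-- 	iter1 = itertools.chain(adc0_lsb)
-- 	iter2 = itertools.chain(adc1_msb)
-- 	iter3 = itertools.chain(adc1_lsb)
-- 	adc_tuple = itertools.izip \
-- 	( \
-- 		iter0, iter0, iter0, iter0, \
-- 		iter1, iter1, iter1, iter1, \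
-- 		iter2, iter2, iter2, iter2, \
-- 		iter3, iter3, iter3, iter3 \
-- 	)
-- 	adc_list = [x for y in adc_tuple for x in y]
-- 	return adc_list
-- ===== SOURCE B (Python) =====
-- def uncat_adc(adc0_msb, adc0_lsb, adc1_msb, adc1_lsb):
--     """Un-concatenates and re-interleaves adc data."""
--     n = min(len(adc0_msb), len(adc0_lsb), len(adc1_msb), len(adc1_lsb)) // 4
--     out = []
--     for i in range(n):
--         out.extend(adc0_msb[4*i:4*i+4])
--         out.extend(adc0_lsb[4*i:4*i+4])
--         out.extend(adc1_msb[4*i:4*i+4])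
--         out.extend(adc1_lsb[4*i:4*i+4])
--     return out
-- ===== Notes on version B (the rewrite author's own statement) =====
-- stated objective: simpler
-- what changed: Replaces the izip-over-four-shared-iterators trick (each iterator listed four times, tuples flattened by a nested comprehension) with a plain indexed loop over the number of complete 4-element blocks, extending the output with four slices per block.
import Mathlib
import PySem

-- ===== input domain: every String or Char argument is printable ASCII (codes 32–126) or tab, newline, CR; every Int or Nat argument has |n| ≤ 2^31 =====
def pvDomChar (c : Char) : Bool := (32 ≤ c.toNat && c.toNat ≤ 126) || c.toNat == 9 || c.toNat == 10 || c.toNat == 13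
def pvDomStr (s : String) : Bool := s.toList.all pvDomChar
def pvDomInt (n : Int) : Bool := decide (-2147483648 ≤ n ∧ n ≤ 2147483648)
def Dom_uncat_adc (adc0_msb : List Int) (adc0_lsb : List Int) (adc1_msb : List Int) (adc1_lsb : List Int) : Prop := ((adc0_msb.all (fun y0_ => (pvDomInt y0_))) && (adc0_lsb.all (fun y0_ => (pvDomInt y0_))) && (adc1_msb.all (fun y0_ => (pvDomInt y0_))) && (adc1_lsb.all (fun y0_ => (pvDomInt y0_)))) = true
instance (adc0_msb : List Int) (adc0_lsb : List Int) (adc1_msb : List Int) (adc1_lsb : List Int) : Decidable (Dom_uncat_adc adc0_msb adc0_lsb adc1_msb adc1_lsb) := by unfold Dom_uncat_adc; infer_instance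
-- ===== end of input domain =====

-- B replaces izip over four shared iterators with an indexed loop over complete 4-element blocks (objective: simpler).
-- ===== PORT A =====
-- izip over each iterator listed four times: each produced tuple consumes 4 elements from
-- every stream, and izip stops (discarding partially consumed elements) once any stream
-- cannot supply a full 4; the comprehension flattens the tuples.
def uncat_adc_zip (l0 l1 l2 l3 : List Int) : List (List Int) :=
  match l0, l1, l2, l3 with
  | a1::a2::a3::a4::r0, b1::b2::b3::b4::r1, c1::c2::c3::c4::r2, d1::d2::d3::d4::r3 =>
      [a1,a2,a3,a4,b1,b2,b3,b4,c1,c2,c3,c4,d1,d2,d3,d4] :: uncat_adc_zip r0 r1 r2 r3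
  | _, _, _, _ => []

def uncat_adc (adc0_msb : List Int) (adc0_lsb : List Int) (adc1_msb : List Int) (adc1_lsb : List Int) : List Int :=
  (uncat_adc_zip adc0_msb adc0_lsb adc1_msb adc1_lsb).flatten

-- ===== PORT B =====
-- xs[4*i:4*i+4] for a natural i (exact for these nonnegative slice bounds)
def pvSlice4 (xs : List Int) (i : Nat) : List Int := (xs.drop (4*i)).take 4

def uncat_adc_alt (adc0_msb : List Int) (adc0_lsb : List Int) (adc1_msb : List Int) (adc1_lsb : List Int) : List Int :=
  let n := (min (min adc0_msb.length adc0_lsb.length) (min adc1_msb.length adc1_lsb.length)) / 4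
  (List.range n).foldl
    (fun acc i => acc ++ pvSlice4 adc0_msb i ++ pvSlice4 adc0_lsb i
                      ++ pvSlice4 adc1_msb i ++ pvSlice4 adc1_lsb i) []

-- ===== PRECONDITION & SPEC =====
def Spec_uncat_adc (adc0_msb : List Int) (adc0_lsb : List Int) (adc1_msb : List Int) (adc1_lsb : List Int) (out : List Int) : Prop := out = uncat_adc_alt adc0_msb adc0_lsb adc1_msb adc1_lsb
instance (adc0_msb : List Int) (adc0_lsb : List Int) (adc1_msb : List Int) (adc1_lsb : List Int) (out : List Int) : Decidable (Spec_uncat_adc adc0_msb adc0_lsb adc1_msb adc1_lsb out) := by unfold Spec_uncat_adc; infer_instance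

-- ===== CLAIM (what is proved, stated in full; the proofs are below) =====
def Claim_equal_uncat_adc : Prop := ∀ (adc0_msb : List Int) (adc0_lsb : List Int) (adc1_msb : List Int) (adc1_lsb : List Int), Dom_uncat_adc adc0_msb adc0_lsb adc1_msb adc1_lsb → Spec_uncat_adc adc0_msb adc0_lsb adc1_msb adc1_lsb (uncat_adc adc0_msb adc0_lsb adc1_msb adc1_lsb)

-- ===== LEMMAS AND PROOFS =====
lemma alt_eq_flatMap (l0 l1 l2 l3 : List Int) :
    uncat_adc_alt l0 l1 l2 l3 =
    (List.range ((min (min l0.length l1.length) (min l2.length l3.length)) / 4)).flatMap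
      (fun i => pvSlice4 l0 i ++ pvSlice4 l1 i ++ pvSlice4 l2 i ++ pvSlice4 l3 i) := by
  unfold uncat_adc_alt
  rw [show (fun (acc : List Int) i => acc ++ pvSlice4 l0 i ++ pvSlice4 l1 i
              ++ pvSlice4 l2 i ++ pvSlice4 l3 i)
        = fun acc i => acc ++ (pvSlice4 l0 i ++ pvSlice4 l1 i ++ pvSlice4 l2 i ++ pvSlice4 l3 i)
      from by funext acc i; simp [List.append_assoc]]
  rw [PySem.List.foldl_append_eq_flatMap]
  simp

lemma key (l0 l1 l2 l3 : List Int) :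
    (List.range ((min (min l0.length l1.length) (min l2.length l3.length)) / 4)).flatMap
      (fun i => pvSlice4 l0 i ++ pvSlice4 l1 i ++ pvSlice4 l2 i ++ pvSlice4 l3 i)
    = (uncat_adc_zip l0 l1 l2 l3).flatten := by
  fun_induction uncat_adc_zip l0 l1 l2 l3 with
  | case1 a1 a2 a3 a4 r0 b1 b2 b3 b4 r1 c1 c2 c3 c4 r2 d1 d2 d3 d4 r3 ih =>
      have h4 : min (min (r0.length+1+1+1+1) (r1.length+1+1+1+1))
                  (min (r2.length+1+1+1+1) (r3.length+1+1+1+1))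
          = (min (min r0.length r1.length) (min r2.length r3.length)) + 4 := by omega
      have hm : (min (min (a1::a2::a3::a4::r0).length (b1::b2::b3::b4::r1).length)
                   (min (c1::c2::c3::c4::r2).length (d1::d2::d3::d4::r3).length)) / 4
          = (min (min r0.length r1.length) (min r2.length r3.length)) / 4 + 1 := by
        simp only [List.length_cons, h4]
        omega
      rw [hm, List.range_succ_eq_map, List.flatMap_cons, List.flatMap_map]
      rw [List.flatten_cons, ← ih]
      have h : ∀ (x1 x2 x3 x4 : Int) (r : List Int) (i : Nat),
          pvSlice4 (x1::x2::x3::x4::r) (i+1) = pvSlice4 r i := by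
        intro x1 x2 x3 x4 r i
        have e : 4*(i+1) = 4 + 4*i := by ring
        simp only [pvSlice4, e, ← List.drop_drop]
        simp
      simp only [Nat.succ_eq_add_one, h]
      simp [pvSlice4]
  | case2 l0 l1 l2 l3 h =>
      have hn : (min (min l0.length l1.length) (min l2.length l3.length)) / 4 = 0 := by
        have hlt : l0.length < 4 ∨ l1.length < 4 ∨ l2.length < 4 ∨ l3.length < 4 := by
          by_contra hc
          push_neg at hc
          obtain ⟨h0, h1, h2, h3⟩ := hc
          match l0, h0, l1, h1, l2, h2, l3, h3 with
          | a1::a2::a3::a4::r0, _, b1::b2::b3::b4::r1, _, c1::c2::c3::c4::r2, _,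
            d1::d2::d3::d4::r3, _ =>
            exact h a1 a2 a3 a4 r0 b1 b2 b3 b4 r1 c1 c2 c3 c4 r2 d1 d2 d3 d4 r3 rfl rfl rfl rfl
        exact Nat.div_eq_of_lt (by omega)
      rw [hn]
      simp

-- ===== VERDICT =====
theorem uncat_adc_spec : Claim_equal_uncat_adc := by
  intro l0 l1 l2 l3 _
  unfold Spec_uncat_adc uncat_adc
  rw [alt_eq_flatMap, key]
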